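-- pv_equiv track=rewrite | github.com/RoryBlu/sparkjar-crew-api | src/chat/processors/tutor_mode_v1.py | _suggest_next_topics
-- ===== SOURCE A (Python) =====
-- from typing import Any, Dict, List, Optional, Tuple
--
-- def _suggest_next_topics(
--
--     current_topic: Optional[str],
--     memories: List[Dict[str, Any]],
--     understanding_level: int
-- ) -> List[str]:
--     """
--     Suggest appropriate next topics.
--
--     KISS: Extract from memory relationships.
--     """
--     suggestions = []
--
--     # Extract topics from memories
--     for memory in memories[:10]:
--         # Look for related concepts in metadata
--         metadata = memory.get("metadata", {})
--         related = metadata.get("related_topics", [])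
--         suggestions.extend(related)
--
--     # Add progression based on understanding
--     if current_topic and understanding_level >= 3:
--         suggestions.append(f"Advanced {current_topic}")
--
--     # Deduplicate and limit
--     seen = set()
--     unique_suggestions = []
--     for s in suggestions:
--         if s not in seen and s != current_topic:
--             seen.add(s)
--             unique_suggestions.append(s)
--
--     return unique_suggestions[:5]
-- ===== SOURCE B (Python) =====
-- def _suggest_next_topics(current_topic, memories, understanding_level):
--     # One fused early-terminating pass instead of flatten -> dedup -> slice.
--     seen = set()
--     unique = []
--     for memory in memories[:10]:
--         for t in memory.get("metadata", {}).get("related_topics", []):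
--             if t not in seen and t != current_topic:
--                 seen.add(t)
--                 unique.append(t)
--                 if len(unique) == 5:
--                     return unique
--     if current_topic and understanding_level >= 3:
--         adv = f"Advanced {current_topic}"
--         if adv not in seen:
--             unique.append(adv)
--     return unique
-- ===== Notes on version B (the rewrite author's own statement) =====
-- stated objective: alternative
-- what changed: Replaced A's three-phase flatten-all-topics / append-advanced / dedup-then-slice pipeline with a single fused early-terminating traversal that dedupes while collecting and stops as soon as 5 unique topics are found, handling the advanced-topic suggestion as a separate post-step only when the cap was not reached.
import Mathlib
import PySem

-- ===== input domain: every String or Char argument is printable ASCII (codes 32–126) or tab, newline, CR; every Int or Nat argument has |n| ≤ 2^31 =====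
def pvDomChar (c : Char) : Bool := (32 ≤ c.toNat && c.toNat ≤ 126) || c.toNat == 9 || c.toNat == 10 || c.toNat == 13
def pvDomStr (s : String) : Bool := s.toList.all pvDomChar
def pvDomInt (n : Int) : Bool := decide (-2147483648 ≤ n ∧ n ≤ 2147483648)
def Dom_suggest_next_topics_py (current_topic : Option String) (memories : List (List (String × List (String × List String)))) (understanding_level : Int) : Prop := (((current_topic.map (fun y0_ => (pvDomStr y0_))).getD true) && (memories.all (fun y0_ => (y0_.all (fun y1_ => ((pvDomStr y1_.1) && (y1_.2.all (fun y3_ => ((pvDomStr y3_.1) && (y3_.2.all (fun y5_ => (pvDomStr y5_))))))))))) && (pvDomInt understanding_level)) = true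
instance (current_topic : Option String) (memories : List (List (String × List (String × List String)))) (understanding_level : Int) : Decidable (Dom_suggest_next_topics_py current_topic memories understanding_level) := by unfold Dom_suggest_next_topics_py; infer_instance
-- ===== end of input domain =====

-- B replaces A's flatten/append/dedup-then-slice pipeline with one fused early-terminating
-- dedup pass capped at 5 (objective: alternative decomposition, same asymptotic cost).


-- ===== PORT A =====
-- memory.get("metadata", {}).get("related_topics", []) (shared dict-lookup helper)
def pvRelated (memory : List (String × List (String × List String))) : List String :=
  PySem.Dict.getD (PySem.Dict.mk (PySem.Dict.getD (PySem.Dict.mk memory) "metadata" [])) "related_topics" []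

-- s != current_topic (a str is never equal to None)
def pvEqCt (current_topic : Option String) (s : String) : Bool :=
  match current_topic with
  | some c => s == c
  | none => false

-- the body of A's dedup loop: if s not in seen and s != current_topic: seen.add(s); unique.append(s)
def pvStep (current_topic : Option String) (st : PySem.Set String × List String) (s : String) :
    PySem.Set String × List String :=
  if !(PySem.Set.contains st.1 s) && !(pvEqCt current_topic s) then
    (PySem.Set.add st.1 s, st.2 ++ [s])
  else st

def suggest_next_topics_py (current_topic : Option String) (memories : List (List (String × List (String × List String)))) (understanding_level : Int) : List String :=
  -- phase 1: collect all related topics of the first 10 memories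
  let suggestions := (memories.take 10).foldl (fun acc memory => acc ++ pvRelated memory) []
  -- phase 2: if current_topic and understanding_level >= 3: append "Advanced {current_topic}"
  let suggestions :=
    match current_topic with
    | some c => if (c != "") && decide (3 ≤ understanding_level) then suggestions ++ ["Advanced " ++ c] else suggestions
    | none => suggestions
  -- phase 3: dedup (keeping first occurrences, dropping current_topic), then slice [:5]
  let st := suggestions.foldl (pvStep current_topic) (PySem.Set.empty, [])
  st.2.take 5

-- ===== PORT B =====
-- inner loop over one memory's topics; Bool result = early `return unique` fired (cap of 5 reached)
def pvBInner (current_topic : Option String) (seen : PySem.Set String) (acc : List String) :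
    List String → PySem.Set String × List String × Bool
  | [] => (seen, acc, false)
  | t :: ts =>
    if !(PySem.Set.contains seen t) && !(pvEqCt current_topic t) then
      let seen' := PySem.Set.add seen t
      let acc' := acc ++ [t]
      if acc'.length == 5 then (seen', acc', true) else pvBInner current_topic seen' acc' ts
    else pvBInner current_topic seen acc ts

-- outer loop over memories[:10], propagating the early return
def pvBOuter (current_topic : Option String) (seen : PySem.Set String) (acc : List String) :
    List (List (String × List (String × List String))) → PySem.Set String × List String × Bool
  | [] => (seen, acc, false)
  | m :: ms =>
    let r := pvBInner current_topic seen acc (pvRelated m)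
    if r.2.2 then r else pvBOuter current_topic r.1 r.2.1 ms

def suggest_next_topics_py_alt (current_topic : Option String) (memories : List (List (String × List (String × List String)))) (understanding_level : Int) : List String :=
  let r := pvBOuter current_topic PySem.Set.empty [] (memories.take 10)
  if r.2.2 then r.2.1
  else
    match current_topic with
    | some c =>
      if (c != "") && decide (3 ≤ understanding_level) then
        let adv := "Advanced " ++ c
        if !(PySem.Set.contains r.1 adv) then r.2.1 ++ [adv] else r.2.1
      else r.2.1
    | none => r.2.1

-- ===== PRECONDITION & SPEC =====
def Spec_suggest_next_topics_py (current_topic : Option String) (memories : List (List (String × List (String × List String)))) (understanding_level : Int) (out : List String) : Prop := out = suggest_next_topics_py_alt current_topic memories understanding_level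
instance (current_topic : Option String) (memories : List (List (String × List (String × List String)))) (understanding_level : Int) (out : List String) : Decidable (Spec_suggest_next_topics_py current_topic memories understanding_level out) := by unfold Spec_suggest_next_topics_py; infer_instance

-- ===== CLAIM (what is proved, stated in full; the proofs are below) =====
def Claim_equal_suggest_next_topics_py : Prop := ∀ (current_topic : Option String) (memories : List (List (String × List (String × List String)))) (understanding_level : Int), Dom_suggest_next_topics_py current_topic memories understanding_level → Spec_suggest_next_topics_py current_topic memories understanding_level (suggest_next_topics_py current_topic memories understanding_level)

-- ===== LEMMAS AND PROOFS =====

-- A's suggestion collection is a flatMap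
theorem pv_foldl_flat (ms : List (List (String × List (String × List String)))) (init : List String) :
    ms.foldl (fun acc memory => acc ++ pvRelated memory) init = init ++ ms.flatMap pvRelated := by
  induction ms generalizing init with
  | nil => simp
  | cons m ms ih => simp [List.foldl_cons, ih, List.flatMap_cons]

-- the dedup fold only appends to the accumulator; the seen-set does not depend on it
theorem pv_fold_acc (ct : Option String) (l : List String) :
    ∀ seen acc, l.foldl (pvStep ct) (seen, acc)
      = ((l.foldl (pvStep ct) (seen, [])).1, acc ++ (l.foldl (pvStep ct) (seen, [])).2) := by
  induction l with
  | nil => simp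
  | cons t ts ih =>
    intro seen acc
    by_cases h : (!(PySem.Set.contains seen t) && !(pvEqCt ct t)) = true
    · simp only [List.foldl_cons, pvStep, h, if_pos]
      rw [ih (PySem.Set.add seen t) (acc ++ [t]), ih (PySem.Set.add seen t) ([] ++ [t])]
      simp
    · simp only [List.foldl_cons, pvStep, h]
      simp [ih seen acc]

-- length form of pv_fold_acc
theorem pv_fold_len (ct : Option String) (l : List String) (seen : PySem.Set String) (acc : List String) :
    (l.foldl (pvStep ct) (seen, acc)).2.length = acc.length + (l.foldl (pvStep ct) (seen, [])).2.length := by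
  rw [pv_fold_acc]; simp

-- inner loop vs the dedup fold, when the cap is not reached
theorem pv_inner_lt (ct : Option String) (l : List String) :
    ∀ seen acc, acc.length < 5 → (l.foldl (pvStep ct) (seen, acc)).2.length < 5 →
      pvBInner ct seen acc l = ((l.foldl (pvStep ct) (seen, acc)).1, (l.foldl (pvStep ct) (seen, acc)).2, false) := by
  induction l with
  | nil => intro seen acc _ _; simp [pvBInner]
  | cons t ts ih =>
    intro seen acc hacc hlen
    by_cases h : (!(PySem.Set.contains seen t) && !(pvEqCt ct t)) = true
    · simp only [List.foldl_cons, pvStep, h, if_pos] at hlen ⊢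
      have h2 := hlen
      rw [pv_fold_len] at h2
      simp only [List.length_append, List.length_cons, List.length_nil] at h2
      have hlt : (acc ++ [t]).length < 5 := by simp; omega
      simp only [pvBInner, h, if_pos]
      have h5 : ((acc ++ [t]).length == 5) = false := by simp; omega
      simp only [h5, Bool.false_eq_true, if_false]
      exact ih (PySem.Set.add seen t) (acc ++ [t]) hlt hlen
    · simp only [List.foldl_cons, pvStep, h] at hlen ⊢
      simp only [pvBInner, h, Bool.false_eq_true, if_false]
      exact ih seen acc hacc hlen

-- inner loop vs the dedup fold, when the cap is reached: early return with the first 5 uniques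
theorem pv_inner_ge (ct : Option String) (l : List String) :
    ∀ seen acc, acc.length < 5 → 5 ≤ (l.foldl (pvStep ct) (seen, acc)).2.length →
      (pvBInner ct seen acc l).2 = ((l.foldl (pvStep ct) (seen, acc)).2.take 5, true) := by
  induction l with
  | nil => intro seen acc hacc hlen; simp at hlen; omega
  | cons t ts ih =>
    intro seen acc hacc hlen
    by_cases h : (!(PySem.Set.contains seen t) && !(pvEqCt ct t)) = true
    · simp only [List.foldl_cons, pvStep, h, if_pos] at hlen ⊢
      simp only [pvBInner, h, if_pos]
      by_cases h5 : (acc ++ [t]).length = 5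
      · have h5' : ((acc ++ [t]).length == 5) = true := by simp [h5]
        simp only [h5', if_pos]
        rw [pv_fold_acc ct ts (PySem.Set.add seen t) (acc ++ [t])]
        have h55 : (5:Nat) = (acc ++ [t]).length := h5.symm
        rw [h55, List.take_left]
      · have hne : acc.length + 1 ≠ 5 := by
          intro hx; exact h5 (by simp; omega)
        have hlt : (acc ++ [t]).length < 5 := by simp; omega
        have h5' : ((acc ++ [t]).length == 5) = false := by simp; omega
        simp only [h5', Bool.false_eq_true, if_false]
        exact ih (PySem.Set.add seen t) (acc ++ [t]) hlt hlen
    · simp only [List.foldl_cons, pvStep, h] at hlen ⊢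
      simp only [pvBInner, h, Bool.false_eq_true, if_false]
      exact ih seen acc hacc hlen

-- outer loop vs the dedup fold over the flattened topics, cap not reached
theorem pv_outer_lt (ct : Option String) (ms : List (List (String × List (String × List String)))) :
    ∀ seen acc, acc.length < 5 → ((ms.flatMap pvRelated).foldl (pvStep ct) (seen, acc)).2.length < 5 →
      pvBOuter ct seen acc ms
        = (((ms.flatMap pvRelated).foldl (pvStep ct) (seen, acc)).1,
           ((ms.flatMap pvRelated).foldl (pvStep ct) (seen, acc)).2, false) := by
  induction ms with
  | nil => intro seen acc _ _; simp [pvBOuter]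
  | cons m ms ih =>
    intro seen acc hacc hlen
    rw [List.flatMap_cons, List.foldl_append] at hlen ⊢
    cases hE : (pvRelated m).foldl (pvStep ct) (seen, acc) with
    | mk s1 a1 =>
      rw [hE] at hlen
      have hr1lt : a1.length < 5 := by
        have h2 := hlen
        rw [pv_fold_len] at h2
        omega
      have hin := pv_inner_lt ct (pvRelated m) seen acc hacc (by rw [hE]; exact hr1lt)
      rw [hE] at hin
      simp only [pvBOuter, hin, Bool.false_eq_true, if_false]
      exact ih s1 a1 hr1lt hlen

-- outer loop vs the dedup fold over the flattened topics, cap reached: early return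
theorem pv_outer_ge (ct : Option String) (ms : List (List (String × List (String × List String)))) :
    ∀ seen acc, acc.length < 5 → 5 ≤ ((ms.flatMap pvRelated).foldl (pvStep ct) (seen, acc)).2.length →
      (pvBOuter ct seen acc ms).2 = (((ms.flatMap pvRelated).foldl (pvStep ct) (seen, acc)).2.take 5, true) := by
  induction ms with
  | nil => intro seen acc hacc hlen; simp at hlen; omega
  | cons m ms ih =>
    intro seen acc hacc hlen
    rw [List.flatMap_cons, List.foldl_append] at hlen ⊢
    cases hE : (pvRelated m).foldl (pvStep ct) (seen, acc) with
    | mk s1 a1 =>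
      rw [hE] at hlen
      by_cases hr1lt : a1.length < 5
      · have hin := pv_inner_lt ct (pvRelated m) seen acc hacc (by rw [hE]; exact hr1lt)
        rw [hE] at hin
        simp only [pvBOuter, hin, Bool.false_eq_true, if_false]
        exact ih s1 a1 hr1lt hlen
      · have hge : 5 ≤ a1.length := Nat.le_of_not_lt hr1lt
        have hin := pv_inner_ge ct (pvRelated m) seen acc hacc (by rw [hE]; exact hge)
        rw [hE] at hin
        have hdone : (pvBInner ct seen acc (pvRelated m)).2.2 = true := by rw [hin]
        simp only [pvBOuter, hdone, if_pos]
        rw [hin]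
        rw [pv_fold_acc ct (ms.flatMap pvRelated)]
        simp only [Prod.mk.injEq, and_true]
        rw [List.take_append_of_le_length hge]

-- "Advanced {c}" is never equal to c (it is 9 characters longer)
theorem pv_adv_ne (c : String) : (("Advanced " ++ c) == c) = false := by
  simp only [beq_eq_false_iff_ne, ne_eq]
  intro h
  have hl := congrArg String.length h
  rw [String.length_append] at hl
  have h9 : ("Advanced ").length = 9 := rfl
  omega

-- ===== VERDICT (by name: the statement is the Claim_ definition above) =====
theorem suggest_next_topics_py_spec : Claim_equal_suggest_next_topics_py := by
  intro ct mems lvl _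
  unfold Spec_suggest_next_topics_py suggest_next_topics_py suggest_next_topics_py_alt
  rw [pv_foldl_flat]
  simp only [List.nil_append]
  cases hB : pvBOuter ct PySem.Set.empty [] (mems.take 10) with
  | mk sB r2 =>
    cases r2 with
    | mk accB done =>
      have h0 : ([] : List String).length < 5 := by simp
      by_cases hlen : (((mems.take 10).flatMap pvRelated).foldl (pvStep ct) (PySem.Set.empty, [])).2.length < 5
      · have hout := pv_outer_lt ct (mems.take 10) PySem.Set.empty [] h0 hlen
        rw [hB] at hout
        simp only [Prod.mk.injEq] at hout
        obtain ⟨h1, h2, h3⟩ := hout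
        subst h1; subst h2; subst h3
        simp only [Bool.false_eq_true, if_false]
        rcases ct with _ | c
        · exact List.take_of_length_le (Nat.le_of_lt hlen)
        · by_cases hc : (c != "" && decide (3 ≤ lvl)) = true
          · simp only [hc, if_pos]
            rw [List.foldl_append]
            simp only [List.foldl_cons, List.foldl_nil, pvStep, pvEqCt, pv_adv_ne,
              Bool.not_false, Bool.and_true]
            by_cases hcon : (PySem.Set.contains (((mems.take 10).flatMap pvRelated).foldl (pvStep (some c)) (PySem.Set.empty, [])).1 ("Advanced " ++ c)) = true
            · simp only [hcon, Bool.not_true, Bool.false_eq_true, if_false]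
              exact List.take_of_length_le (Nat.le_of_lt hlen)
            · simp only [Bool.not_eq_true] at hcon
              simp only [hcon, Bool.not_false, if_pos]
              refine List.take_of_length_le ?_
              rw [List.length_append]
              simp only [List.length_cons, List.length_nil]
              omega
          · simp only [hc, Bool.false_eq_true, if_false]
            exact List.take_of_length_le (Nat.le_of_lt hlen)
      · have hge := Nat.le_of_not_lt hlen
        have hout := pv_outer_ge ct (mems.take 10) PySem.Set.empty [] h0 hge
        rw [hB] at hout
        simp only [Prod.mk.injEq] at hout
        obtain ⟨h2, h3⟩ := hout
        subst h2; subst h3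
        simp only [if_pos]
        rcases ct with _ | c
        · rfl
        · by_cases hc : (c != "" && decide (3 ≤ lvl)) = true
          · simp only [hc, if_pos]
            rw [List.foldl_append]
            simp only [List.foldl_cons, List.foldl_nil, pvStep, pvEqCt, pv_adv_ne,
              Bool.not_false, Bool.and_true]
            by_cases hcon : (PySem.Set.contains (((mems.take 10).flatMap pvRelated).foldl (pvStep (some c)) (PySem.Set.empty, [])).1 ("Advanced " ++ c)) = true
            · simp only [hcon, Bool.not_true, Bool.false_eq_true, if_false]
            · simp only [Bool.not_eq_true] at hcon
              simp only [hcon, Bool.not_false, if_pos]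
              rw [List.take_append_of_le_length hge]
          · simp only [hc, Bool.false_eq_true, if_false]
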